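-- pv_equiv track=rewrite | github.com/FreddyMachaca/INF-111 | LABORATORIOS/LABORATORIO2/Ejercicio10/Python/SecuenciaGenerador.py | generar_secuencia
-- ===== SOURCE A (Python) =====
-- def generar_secuencia(n):
--     secuencia = []
--     contador = 0
--     repeticiones = 1
--
--     for _ in range(n):
--         secuencia.extend([contador] * repeticiones)
--         contador = 1 - contador
--         repeticiones += 1
--
--     return secuencia[:n]
-- ===== SOURCE B (Python) =====
-- def generar_secuencia(n):
--     resultado = []
--     bit = 0
--     restante = 1
--     tam = 1
--     for _ in range(n):
--         resultado.append(bit)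
--         restante -= 1
--         if restante == 0:
--             bit = 1 - bit
--             tam += 1
--             restante = tam
--     return resultado
-- ===== Notes on version B (the rewrite author's own statement) =====
-- stated objective: faster
-- what changed: Instead of materialising n full alternating blocks (quadratic total length) and slicing to n, B emits exactly one element per iteration, tracking the current bit and the remaining length of the current block, so no truncation and only n appends.
import Mathlib
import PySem

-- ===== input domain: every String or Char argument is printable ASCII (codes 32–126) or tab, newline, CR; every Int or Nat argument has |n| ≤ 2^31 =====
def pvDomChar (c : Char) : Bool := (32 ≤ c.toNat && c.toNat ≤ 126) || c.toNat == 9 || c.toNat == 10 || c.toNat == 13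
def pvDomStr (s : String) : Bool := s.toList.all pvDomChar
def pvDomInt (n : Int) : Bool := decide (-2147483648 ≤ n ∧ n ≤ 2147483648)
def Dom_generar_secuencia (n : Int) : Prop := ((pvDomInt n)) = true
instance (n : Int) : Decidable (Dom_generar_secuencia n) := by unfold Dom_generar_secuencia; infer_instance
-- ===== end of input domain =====

-- B replaces A's quadratic build-all-blocks-then-slice with a one-pass loop emitting one element
-- per iteration (objective: faster; a timing run decides the label).

-- ===== PORT A =====
-- state = (secuencia, contador, repeticiones); [contador]*repeticiones is replicate .toNat (Python: negative count = empty)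
def pvStepA (s : List Int × Int × Int) (_ : Int) : List Int × Int × Int :=
  (s.1 ++ List.replicate s.2.2.toNat s.2.1, 1 - s.2.1, s.2.2 + 1)

def generar_secuencia (n : Int) : List Int :=
  let st := (PySem.List.pyRange 0 n 1).foldl pvStepA ([], 0, 1)
  PySem.List.slice st.1 none (some n)

-- ===== PORT B =====
-- state = (resultado, bit, restante, tam)
def pvStepB (s : List Int × Int × Int × Int) (_ : Int) : List Int × Int × Int × Int :=
  let res := s.1 ++ [s.2.1]
  let restante := s.2.2.1 - 1
  if restante = 0 then (res, 1 - s.2.1, s.2.2.2 + 1, s.2.2.2 + 1)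
  else (res, s.2.1, restante, s.2.2.2)

def generar_secuencia_alt (n : Int) : List Int :=
  ((PySem.List.pyRange 0 n 1).foldl pvStepB ([], 0, 1, 1)).1

-- ===== PRECONDITION & SPEC =====
def Spec_generar_secuencia (n : Int) (out : List Int) : Prop := out = generar_secuencia_alt n
instance (n : Int) (out : List Int) : Decidable (Spec_generar_secuencia n out) := by unfold Spec_generar_secuencia; infer_instance

-- ===== CLAIM (what is proved, stated in full; the proofs are below) =====
def Claim_equal_generar_secuencia : Prop := ∀ (n : Int), Dom_generar_secuencia n → Spec_generar_secuencia n (generar_secuencia n)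

-- ===== LEMMAS AND PROOFS =====

-- concatenation of the first k blocks: block k has length k+1 and value k % 2
def pvBlocks : Nat → List Int
  | 0 => []
  | k+1 => pvBlocks k ++ List.replicate (k+1) ((k % 2 : Nat) : Int)

theorem pvBlocks_length_ge (k : Nat) : k ≤ (pvBlocks k).length := by
  induction k with
  | zero => simp [pvBlocks]
  | succ k ih =>
    simp only [pvBlocks, List.length_append, List.length_replicate]; omega

theorem pvBlocks_prefix {k K : Nat} (h : k ≤ K) : pvBlocks k <+: pvBlocks K := by
  induction K with
  | zero => simp [Nat.le_zero.mp h]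
  | succ K ih =>
    rcases Nat.lt_or_ge k (K+1) with hlt | hge
    · exact (ih (by omega)).trans ⟨_, rfl⟩
    · have : k = K + 1 := by omega
      subst this; exact List.prefix_refl _

theorem foldA_eq (m : Nat) :
    (PySem.List.pyRange 0 (m : Int) 1).foldl pvStepA ([], 0, 1)
      = (pvBlocks m, ((m % 2 : Nat) : Int), (m : Int) + 1) := by
  induction m with
  | zero => simp [PySem.List.pyRange_one_eq_nil, pvBlocks]
  | succ m ih =>
    have h : ((m + 1 : Nat) : Int) = (m : Int) + 1 := by push_cast; ring
    rw [h, PySem.List.pyRange_one_succ_right (by positivity), List.foldl_append, ih]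
    simp only [List.foldl_cons, List.foldl_nil, pvStepA]
    refine Prod.ext ?_ (Prod.ext ?_ ?_)
    · show pvBlocks m ++ List.replicate ((m : Int) + 1).toNat ((m % 2 : Nat) : Int) = pvBlocks (m + 1)
      have : ((m : Int) + 1).toNat = m + 1 := by omega
      simp [pvBlocks, this]
    · show 1 - ((m % 2 : Nat) : Int) = (((m + 1) % 2 : Nat) : Int)
      omega
    · show (m : Int) + 1 + 1 = ((m + 1 : Nat) : Int) + 1
      push_cast; ring

theorem foldB_eq (m : Nat) : ∃ k j, j ≤ k ∧ (pvBlocks k).length + j = m ∧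
    (PySem.List.pyRange 0 (m : Int) 1).foldl pvStepB ([], 0, 1, 1)
      = (pvBlocks k ++ List.replicate j ((k % 2 : Nat) : Int),
         ((k % 2 : Nat) : Int), ((k : Int) + 1) - (j : Int), (k : Int) + 1) := by
  induction m with
  | zero => exact ⟨0, 0, by simp [PySem.List.pyRange_one_eq_nil, pvBlocks]⟩
  | succ m ih =>
    obtain ⟨k, j, hjk, hlen, hst⟩ := ih
    have h : ((m + 1 : Nat) : Int) = (m : Int) + 1 := by push_cast; ring
    rw [h, PySem.List.pyRange_one_succ_right (by positivity), List.foldl_append, hst]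
    simp only [List.foldl_cons, List.foldl_nil, pvStepB]
    have hres : (pvBlocks k ++ List.replicate j ((k % 2 : Nat) : Int)) ++ [((k % 2 : Nat) : Int)]
        = pvBlocks k ++ List.replicate (j + 1) ((k % 2 : Nat) : Int) := by
      rw [List.replicate_succ']; simp
    by_cases hj : j = k
    · subst hj
      have hz : ((j : Int) + 1) - (j : Int) - 1 = 0 := by ring
      refine ⟨j + 1, 0, by omega, ?_, ?_⟩
      · simp only [pvBlocks, List.length_append, List.length_replicate]; omega
      · rw [if_pos hz, hres]
        simp only [Prod.mk.injEq]
        refine ⟨?_, ?_, ?_, ?_⟩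
        · simp [pvBlocks]
        · omega
        · push_cast; ring
        · push_cast; ring
    · have hnz : ¬ (((k : Int) + 1) - (j : Int) - 1 = 0) := by
        intro hc; apply hj; omega
      refine ⟨k, j + 1, by omega, by omega, ?_⟩
      rw [if_neg hnz, hres]
      refine Prod.ext rfl (Prod.ext rfl (Prod.ext ?_ rfl))
      push_cast; ring

theorem resB_eq_take (m : Nat) :
    ((PySem.List.pyRange 0 (m : Int) 1).foldl pvStepB ([], 0, 1, 1)).1
      = (pvBlocks m).take m := by
  obtain ⟨k, j, hjk, hlen, hst⟩ := foldB_eq m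
  rw [hst]
  set b : Int := ((k % 2 : Nat) : Int)
  have hpre : pvBlocks k ++ List.replicate j b <+: pvBlocks m := by
    rcases Nat.eq_zero_or_pos j with hj0 | hjpos
    · subst hj0
      simpa using pvBlocks_prefix (show k ≤ m by have := pvBlocks_length_ge k; omega)
    · have hk1 : k + 1 ≤ m := by have := pvBlocks_length_ge k; omega
      have h1 : pvBlocks k ++ List.replicate j b <+: pvBlocks (k + 1) := by
        refine ⟨List.replicate (k + 1 - j) b, ?_⟩
        rw [List.append_assoc, ← List.replicate_add]
        have hjj : j + (k + 1 - j) = k + 1 := by omega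
        rw [hjj]; rfl
      exact h1.trans (pvBlocks_prefix hk1)
  have hlena : (pvBlocks k ++ List.replicate j b).length = m := by simp; omega
  calc pvBlocks k ++ List.replicate j b
      = (pvBlocks m).take (pvBlocks k ++ List.replicate j b).length := List.prefix_iff_eq_take.mp hpre
    _ = (pvBlocks m).take m := by rw [hlena]

-- ===== VERDICT (by name: the statement is the Claim_ definition above) =====
theorem generar_secuencia_spec : Claim_equal_generar_secuencia := by
  intro n _
  show generar_secuencia n = generar_secuencia_alt n
  by_cases hn : 0 ≤ n
  · have hcast : ((n.toNat : Nat) : Int) = n := Int.toNat_of_nonneg hn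
    unfold generar_secuencia generar_secuencia_alt
    rw [← hcast, foldA_eq, resB_eq_take]
    simp only []
    rw [PySem.List.slice_to _ (by omega)]
    simp
    omega
  · unfold generar_secuencia generar_secuencia_alt
    rw [PySem.List.pyRange_one_eq_nil (by omega)]
    simp [PySem.List.slice]
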